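-- pv_equiv track=rewrite | github.com/Shalinivel/Python_practise | maxStreak.py | maxStrek
-- ===== SOURCE A (Python) =====
-- def maxStrek(m,data):
--     res=0
--     c=0
--     for i in data:
--         if "N" not in i:
--             c+=1
--         else:
--             res=max(c,res)
--             c=0
--     res=max(c,res)
--     return(res)
-- ===== SOURCE B (Python) =====
-- def maxStrek(m, data):
--     data = list(data)
--     bounds = [-1]
--     for i, x in enumerate(data):
--         if "N" in x:
--             bounds.append(i)
--     bounds.append(len(data))
--     res = 0
--     for b1, b2 in zip(bounds, bounds[1:]):
--         res = max(res, b2 - b1 - 1)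
--     return res
-- ===== Notes on version B (the rewrite author's own statement) =====
-- stated objective: alternative
-- what changed: Instead of a running reset counter, B collects the indices of entries containing 'N' as separators in one pass, brackets them with sentinel bounds -1 and len(data), and returns the largest gap between consecutive bounds.
import Mathlib
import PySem

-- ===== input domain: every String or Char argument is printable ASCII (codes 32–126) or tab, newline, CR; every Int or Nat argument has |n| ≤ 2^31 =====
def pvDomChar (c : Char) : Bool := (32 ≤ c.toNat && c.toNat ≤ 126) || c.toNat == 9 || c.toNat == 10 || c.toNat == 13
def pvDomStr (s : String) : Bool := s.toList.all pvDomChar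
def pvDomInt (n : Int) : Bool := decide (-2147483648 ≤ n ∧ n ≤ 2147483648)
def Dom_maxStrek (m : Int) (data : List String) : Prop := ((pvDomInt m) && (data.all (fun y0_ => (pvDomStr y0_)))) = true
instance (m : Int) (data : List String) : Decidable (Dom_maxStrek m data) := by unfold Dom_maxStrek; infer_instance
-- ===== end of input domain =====

-- B replaces A's running reset counter by a separator-index pass: collect the indices of
-- entries containing "N", bracket them with sentinels -1 and len(data), and return the
-- largest gap between consecutive bounds (objective: alternative decomposition, same cost).

-- ===== PORT A =====
def maxStrek (m : Int) (data : List String) : Int :=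
  -- res=0; c=0; for i in data: if "N" not in i: c+=1 else: res=max(c,res); c=0
  let s := data.foldl
    (fun (s : Int × Int) i =>
      if PySem.Str.isIn "N" i = false then (s.1, s.2 + 1) else (max s.2 s.1, 0))
    ((0 : Int), (0 : Int))
  max s.2 s.1

-- ===== PORT B =====
-- 'data = list(data)' is the identity on a list argument and is not repeated here.
def maxStrek_alt (m : Int) (data : List String) : Int :=
  let bounds :=
    (PySem.List.enumerate data 0).foldl
      (fun (b : List Int) p => if PySem.Str.isIn "N" p.2 then b ++ [p.1] else b)
      [(-1 : Int)]
  let bounds := bounds ++ [(data.length : Int)]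
  (bounds.zip (bounds.drop 1)).foldl (fun res p => max res (p.2 - p.1 - 1)) 0

-- ===== PRECONDITION & SPEC =====
def Spec_maxStrek (m : Int) (data : List String) (out : Int) : Prop := out = maxStrek_alt m data
instance (m : Int) (data : List String) (out : Int) : Decidable (Spec_maxStrek m data out) := by unfold Spec_maxStrek; infer_instance

-- ===== CLAIM (what is proved, stated in full; the proofs are below) =====
def Claim_equal_maxStrek : Prop := ∀ (m : Int) (data : List String), Dom_maxStrek m data → Spec_maxStrek m data (maxStrek m data)

-- ===== LEMMAS AND PROOFS =====

def pvHasN (x : String) : Bool := PySem.Str.isIn "N" x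

-- length of the leading streak of entries without "N"
def pvLead : List String → Int
  | [] => 0
  | x :: xs => if pvHasN x then 0 else pvLead xs + 1

-- the maximum streak (reference value both ports are reduced to)
def pvBest : List String → Int
  | [] => 0
  | x :: xs => if pvHasN x then pvBest xs else max (pvLead xs + 1) (pvBest xs)

theorem pvLead_nonneg (l : List String) : 0 ≤ pvLead l := by
  induction l with
  | nil => simp [pvLead]
  | cons x xs ih => by_cases h : pvHasN x <;> simp [pvLead, h] <;> omega

theorem pvBest_nonneg (l : List String) : 0 ≤ pvBest l := by
  induction l with
  | nil => simp [pvBest]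
  | cons x xs ih =>
      by_cases h : pvHasN x
      · simpa [pvBest, h] using ih
      · have hl := pvLead_nonneg xs
        simp [pvBest, h]
        omega

theorem pvLead_le_best (l : List String) : pvLead l ≤ pvBest l := by
  induction l with
  | nil => simp [pvLead, pvBest]
  | cons x xs ih =>
      by_cases h : pvHasN x
      · simpa [pvLead, pvBest, h] using pvBest_nonneg xs
      · simp [pvLead, pvBest, h]

-- characterisation of A's fold from an arbitrary state (res, c) with 0 ≤ c
theorem pvA_fold (l : List String) (res c : Int) (hc : 0 ≤ c) :
    (let s := l.foldl
        (fun (s : Int × Int) i =>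
          if PySem.Str.isIn "N" i = false then (s.1, s.2 + 1) else (max s.2 s.1, 0))
        (res, c)
     max s.2 s.1) = max res (max (c + pvLead l) (pvBest l)) := by
  induction l generalizing res c with
  | nil => simp [pvLead, pvBest]; omega
  | cons x xs ih =>
      rw [List.foldl_cons]
      by_cases h : PySem.Str.isIn "N" x = true
      · have hb : PySem.Chars.isIn ['N'] x.toList = true := by simpa using h
        rw [if_neg (by simp [hb]), ih (max c res) 0 le_rfl]
        have h1 := pvLead_le_best xs
        have h2 := pvBest_nonneg xs
        simp [pvLead, pvBest, pvHasN, hb]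
        omega
      · have hb : PySem.Chars.isIn ['N'] x.toList = false := by simpa using h
        rw [if_pos (by simp [hb]), ih res (c + 1) (by omega)]
        simp [pvLead, pvBest, pvHasN, hb]
        omega

-- the separator-index list, starting index k
def pvSep : List String → Int → List Int
  | [], _ => []
  | x :: xs, k => (if pvHasN x then [k] else []) ++ pvSep xs (k + 1)

theorem pvEnum_fold (l : List String) (k : Int) (acc : List Int) :
    (PySem.List.enumerate l k).foldl
      (fun (b : List Int) p => if PySem.Str.isIn "N" p.2 then b ++ [p.1] else b) acc
    = acc ++ pvSep l k := by
  induction l generalizing k acc with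
  | nil => simp [PySem.List.enumerate_nil, pvSep]
  | cons x xs ih =>
      rw [PySem.List.enumerate_cons, List.foldl_cons]
      by_cases h : PySem.Str.isIn "N" x = true
      · have hb : PySem.Chars.isIn ['N'] x.toList = true := by simpa using h
        rw [if_pos h, ih (k + 1) (acc ++ [k])]
        simp [pvSep, pvHasN, hb]
      · have hb : PySem.Chars.isIn ['N'] x.toList = false := by simpa using h
        rw [if_neg h, ih (k + 1) acc]
        simp [pvSep, pvHasN, hb]

-- fold over zip(bounds, bounds[1:]) as a recursion carrying the previous bound
def pvZf : Int → Int → List Int → Int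
  | _, r, [] => r
  | p, r, q :: qs => pvZf q (max r (q - p - 1)) qs

theorem pvZip_fold (b : List Int) (p r : Int) :
    ((p :: b).zip b).foldl (fun res q => max res (q.2 - q.1 - 1)) r = pvZf p r b := by
  induction b generalizing p r with
  | nil => simp [pvZf]
  | cons q qs ih => simp [pvZf, ih q]

theorem pvZf_sep (l : List String) (k c r : Int) (hc : 0 ≤ c) :
    pvZf (k - c - 1) r (pvSep l k ++ [k + l.length]) = max r (max (c + pvLead l) (pvBest l)) := by
  induction l generalizing k c r with
  | nil => simp [pvSep, pvZf, pvLead, pvBest]; omega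
  | cons x xs ih =>
      have hlen : (k + ((x :: xs).length : Int)) = (k + 1) + (xs.length : Int) := by
        simp [List.length_cons]; push_cast; ring
      by_cases h : pvHasN x
      · simp only [pvSep, h, if_pos, List.cons_append, List.append_assoc, hlen, pvZf,
          List.nil_append, List.singleton_append]
        have hich := ih (k + 1) 0 (max r (k - (k - c - 1) - 1)) le_rfl
        have e : (k : Int) + 1 - 0 - 1 = k := by ring
        rw [e] at hich
        rw [hich]
        have h1 := pvLead_le_best xs
        have h2 := pvBest_nonneg xs
        simp [pvLead, pvBest, h]
        omega
      · simp only [pvSep, h, if_neg, List.nil_append, hlen, Bool.false_eq_true,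
          not_false_eq_true]
        have hich := ih (k + 1) (c + 1) r (by omega)
        have e : (k : Int) + 1 - (c + 1) - 1 = k - c - 1 := by ring
        rw [e] at hich
        rw [hich]
        simp [pvLead, pvBest, h]
        omega

theorem pvAlt_eq_best (m : Int) (data : List String) :
    maxStrek_alt m data = max (0 + pvLead data) (pvBest data) := by
  unfold maxStrek_alt
  rw [pvEnum_fold data 0 [(-1 : Int)]]
  have hb : ([(-1 : Int)] ++ pvSep data 0) ++ [(data.length : Int)]
      = (-1 : Int) :: (pvSep data 0 ++ [(0 : Int) + (data.length : Int)]) := by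
    simp
  simp only [hb, List.drop_succ_cons, List.drop_zero]
  rw [pvZip_fold]
  have : (-1 : Int) = 0 - 0 - 1 := by ring
  rw [this, pvZf_sep data 0 0 0 le_rfl]
  have h1 := pvLead_le_best data
  have h2 := pvBest_nonneg data
  omega

-- ===== VERDICT (by name: the statement is the Claim_ definition above) =====
theorem maxStrek_spec : Claim_equal_maxStrek := by
  intro m data _
  unfold Spec_maxStrek
  rw [pvAlt_eq_best m data]
  have := pvA_fold data 0 0 le_rfl
  unfold maxStrek
  simp only at this ⊢
  rw [this]
  have h1 := pvLead_le_best data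
  have h2 := pvBest_nonneg data
  omega
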